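-- pv_equiv track=rewrite | github.com/winds-mobi/winds-mobi-api | winds_mobi_api/diacritics.py | create_regexp
-- ===== SOURCE A (Python) =====
-- diacritics = "ŠŒŽšœžŸ¥µÀÁÂÃÄÅÆÇÈÉÊËÌÍÎÏÐÑÒÓÔÕÖØÙÚÛÜÝßàáâãäåæçèéêëìíîïðñòóôõöøùúûüýÿ"
--
-- asciis = "SOZsozYYuAAAAAAACEEEEIIIIDNOOOOOOUUUUYsaaaaaaaceeeeiiiionoooooouuuuyy"
--
-- def create_regexp(str):
--     reg_exp = ""
--     for char in str:
--         found = False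
--         for i, ascii in enumerate(asciis):
--             if char == ascii:
--                 if not found:
--                     reg_exp += "["
--                     found = True
--                 reg_exp += diacritics[i]
--
--         reg_exp += char
--         if found:
--             reg_exp += "]"
--
--     return reg_exp
-- ===== SOURCE B (Python) =====
-- diacritics = "ŠŒŽšœžŸ¥µÀÁÂÃÄÅÆÇÈÉÊËÌÍÎÏÐÑÒÓÔÕÖØÙÚÛÜÝßàáâãäåæçèéêëìíîïðñòóôõöøùúûüýÿ"
--
-- asciis = "SOZsozYYuAAAAAAACEEEEIIIIDNOOOOOOUUUUYsaaaaaaaceeeeiiiionoooooouuuuyy"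
--
-- # Precompute once: one textual rewrite rule per distinct ascii letter,
-- # mapping it to its full bracketed class "[<variants><char>]".
-- _variants = {}
-- for _a, _d in zip(asciis, diacritics):
--     _variants[_a] = _variants.get(_a, "") + _d
-- _RULES = [(_a, "[" + _v + _a + "]") for _a, _v in _variants.items()]
--
-- def create_regexp(str):
--     # Apply each rewrite rule to the whole string in turn. This is safe:
--     # every inserted text consists of non-ASCII diacritics, brackets and the
--     # rule's own key, none of which is a key of any later rule.
--     for _a, _rep in _RULES:
--         str = str.replace(_a, _rep)
--     return str
-- ===== Notes on version B (the rewrite author's own statement) =====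
-- stated objective: alternative
-- what changed: B builds once a list of textual rewrite rules (one per distinct ascii letter, mapping it to its whole bracketed class '[<variants><char>]') and then produces the result by successive whole-string str.replace passes, instead of A's per-character rescan of the 69-entry table with incremental bracket emission.
import Mathlib
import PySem

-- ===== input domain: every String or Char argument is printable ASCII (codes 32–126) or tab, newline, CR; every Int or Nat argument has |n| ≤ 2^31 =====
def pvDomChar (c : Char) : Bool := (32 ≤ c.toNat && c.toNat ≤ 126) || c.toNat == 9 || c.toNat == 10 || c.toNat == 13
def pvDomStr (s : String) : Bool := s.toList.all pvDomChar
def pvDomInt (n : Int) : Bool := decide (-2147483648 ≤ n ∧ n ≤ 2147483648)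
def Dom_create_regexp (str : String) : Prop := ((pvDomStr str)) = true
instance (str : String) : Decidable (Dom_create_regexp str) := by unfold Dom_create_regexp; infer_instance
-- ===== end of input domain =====

-- B replaces A's per-character rescan of the 69-entry table by a fixed list of textual
-- rewrite rules (ascii letter → its whole bracketed class) applied as successive
-- whole-string str.replace passes; same return value (timing run measured B faster).

def pvDiacritics : List Char := "ŠŒŽšœžŸ¥µÀÁÂÃÄÅÆÇÈÉÊËÌÍÎÏÐÑÒÓÔÕÖØÙÚÛÜÝßàáâãäåæçèéêëìíîïðñòóôõöøùúûüýÿ".toList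
def pvAsciis : List Char := "SOZsozYYuAAAAAAACEEEEIIIIDNOOOOOOUUUUYsaaaaaaaceeeeiiiionoooooouuuuyy".toList

-- ===== PORT A =====
-- inner loop body: 'for i, ascii in enumerate(asciis): if char == ascii: ...'
-- diacritics[i]: i is always in range (the two tables have equal length), so pyGetD is exact here
def pvInnerA (char : Char) (st : Bool × List Char) (p : Int × Char) : Bool × List Char :=
  if char == p.2 then
    let st1 := if st.1 = false then (true, st.2 ++ ['[']) else st
    (st1.1, st1.2 ++ [PySem.List.pyGetD pvDiacritics p.1 ' '])
  else st

def pvStepA (reg_exp : List Char) (char : Char) : List Char :=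
  let st := (PySem.List.enumerate pvAsciis 0).foldl (pvInnerA char) (false, reg_exp)
  let r := st.2 ++ [char]
  if st.1 then r ++ [']'] else r

def create_regexp (str : String) : String :=
  String.ofList (str.toList.foldl pvStepA [])

-- ===== PORT B =====
-- module level: _variants[a] = _variants.get(a, "") + d over zip(asciis, diacritics)
def pvVariants : PySem.Dict Char (List Char) :=
  (pvAsciis.zip pvDiacritics).foldl (fun d p => d.modify p.1 [] (· ++ [p.2])) PySem.Dict.empty

-- _RULES = [(a, "[" + v + a + "]") for a, v in _variants.items()]
def pvRules : List (Char × List Char) :=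
  pvVariants.items.map (fun p => (p.1, '[' :: p.2 ++ [p.1, ']']))

-- 'for a, rep in _RULES: str = str.replace(a, rep)'
def create_regexp_alt (str : String) : String :=
  String.ofList (pvRules.foldl (fun s p => PySem.Chars.replace s [p.1] p.2) str.toList)

-- ===== PRECONDITION & SPEC =====
def Spec_create_regexp (str : String) (out : String) : Prop := out = create_regexp_alt str
instance (str : String) (out : String) : Decidable (Spec_create_regexp str out) := by unfold Spec_create_regexp; infer_instance

-- ===== CLAIM =====
def Claim_equal_create_regexp : Prop := ∀ (str : String), Dom_create_regexp str → Spec_create_regexp str (create_regexp str)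

-- ===== LEMMAS AND PROOFS =====

-- A's step only appends: pull the accumulator out front
theorem pvInnerA_shift (c : Char) (p : Int × Char) (b : Bool) (r : List Char) :
    pvInnerA c (b, r) p = ((pvInnerA c (b, []) p).1, r ++ (pvInnerA c (b, []) p).2) := by
  cases hb : b <;> simp [pvInnerA] <;> split <;> simp

theorem pvFoldA_shift (l : List (Int × Char)) (c : Char) (b : Bool) (r : List Char) :
    l.foldl (pvInnerA c) (b, r)
      = ((l.foldl (pvInnerA c) (b, [])).1, r ++ (l.foldl (pvInnerA c) (b, [])).2) := by
  induction l generalizing b r with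
  | nil => simp
  | cons p l ih =>
    rw [List.foldl_cons, List.foldl_cons, pvInnerA_shift]
    rcases hq : pvInnerA c (b, []) p with ⟨b', s⟩
    rw [ih b' (r ++ s), ih b' s]
    simp

theorem pvStepA_shift (acc : List Char) (c : Char) :
    pvStepA acc c = acc ++ pvStepA [] c := by
  simp only [pvStepA, pvFoldA_shift _ c false acc]
  split <;> simp

-- single-character replace is a per-character flatMap
theorem replace_go_singleton (a : Char) (rep : List Char) :
    ∀ (fuel : Nat) (l acc : List Char), l.length ≤ fuel →
      PySem.Chars.replace.go [a] rep fuel l acc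
        = acc.reverse ++ l.flatMap (fun c => if c = a then rep else [c]) := by
  intro fuel
  induction fuel with
  | zero =>
    intro l acc h
    cases l with
    | nil => simp [PySem.Chars.replace.go]
    | cons c t => simp at h
  | succ n ih =>
    intro l acc h
    cases l with
    | nil => simp [PySem.Chars.replace.go]
    | cons c t =>
      simp only [PySem.Chars.replace.go]
      by_cases hc : c = a
      · subst hc
        have hp : List.isPrefixOf [c] (c :: t) = true := by simp [List.isPrefixOf]
        rw [hp]
        simp only [if_true, List.length_cons, List.length_nil, Nat.zero_add,
          List.drop_succ_cons, List.drop_zero]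
        rw [ih t (rep.reverse ++ acc) (by simp at h; omega)]
        simp
      · have hp : List.isPrefixOf [a] (c :: t) = false := by
          simp only [List.isPrefixOf, Bool.and_true,
            beq_eq_false_iff_ne, ne_eq]
          exact fun h' => hc h'.symm
        rw [hp]
        simp only [Bool.false_eq_true, if_false]
        rw [ih t (c :: acc) (by simp at h; omega)]
        simp [hc]

theorem replace_singleton (s : List Char) (a : Char) (rep : List Char) :
    PySem.Chars.replace s [a] rep = s.flatMap (fun c => if c = a then rep else [c]) := by
  simp only [PySem.Chars.replace, List.isEmpty_cons]
  simpa using replace_go_singleton a rep s.length s [] (le_refl _)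

-- the whole rule cascade distributes over the characters of the string
theorem foldRules_flatMap (R : List (Char × List Char)) (l : List Char) :
    R.foldl (fun s p => PySem.Chars.replace s [p.1] p.2) l
      = l.flatMap (fun c => R.foldl (fun s p => PySem.Chars.replace s [p.1] p.2) [c]) := by
  induction R generalizing l with
  | nil => simp
  | cons p R ih =>
    rw [List.foldl_cons, replace_singleton, ih, List.flatMap_assoc]
    apply List.flatMap_congr
    intro c _
    rw [List.foldl_cons]
    have h1 : PySem.Chars.replace [c] [p.1] p.2 = if c = p.1 then p.2 else [c] := by
      rw [replace_singleton]; simp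
    rw [h1, ih]

-- the two per-character results agree on every domain character (finite check)
set_option maxRecDepth 8000 in
theorem pvChar_eq_range :
    ∀ n ∈ List.range 127,
      pvStepA [] (Char.ofNat n)
        = pvRules.foldl (fun s p => PySem.Chars.replace s [p.1] p.2) [Char.ofNat n] := by
  decide

theorem pvChar_eq (c : Char) (h : pvDomChar c = true) :
    pvStepA [] c = pvRules.foldl (fun s p => PySem.Chars.replace s [p.1] p.2) [c] := by
  have h127 : c.toNat < 127 := by
    simp only [pvDomChar, Bool.or_eq_true, Bool.and_eq_true, decide_eq_true_eq, beq_iff_eq] at h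
    omega
  have := pvChar_eq_range c.toNat (List.mem_range.mpr h127)
  simpa [Char.ofNat_toNat] using this

theorem pvFoldStep_eq (l : List Char) (hl : ∀ c ∈ l, pvDomChar c = true) (acc : List Char) :
    l.foldl pvStepA acc = acc ++ l.flatMap (fun c => pvStepA [] c) := by
  induction l generalizing acc with
  | nil => simp
  | cons c l ih =>
    rw [List.foldl_cons, pvStepA_shift, ih (fun x hx => hl x (List.mem_cons_of_mem _ hx))]
    simp

-- ===== VERDICT =====
theorem create_regexp_spec : Claim_equal_create_regexp := by
  intro str hdom
  unfold Spec_create_regexp create_regexp create_regexp_alt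
  have hl : ∀ c ∈ str.toList, pvDomChar c = true := by
    simpa [Dom_create_regexp, pvDomStr, List.all_eq_true] using hdom
  rw [pvFoldStep_eq _ hl, foldRules_flatMap]
  simp only [List.nil_append]
  exact congrArg String.ofList (List.flatMap_congr (fun c hc => pvChar_eq c (hl c hc)))
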